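-- pv_equiv track=rewrite | github.com/aniboy10/Password-generator | password_generator.py | flipByte
-- ===== SOURCE A (Python) =====
-- def flipByte(byte):
--     count = 0
--     byte = list(byte)
--     for bit in byte:
--         if isPrime(count):
--             if bit == '1':
--                 byte[count] = '0'
--             else:
--                 byte[count] = '1'
--         count = count + 1
--     byte = "".join(byte)
--     return byte
--
-- def isPrime(n):
--     i = 2
--     if n < 2:
--         return False
--     while i < n:
--         if n % i == 0:
--             return False
--         else:
--             i += 1
--     return True
-- ===== SOURCE B (Python) =====
-- def flipByte(byte):
--     n = len(byte)
--     # Sieve of Eratosthenes over the index range: start with "2 <= i",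
--     # then mark every proper multiple of every p >= 2 as composite.
--     sieve = [i >= 2 for i in range(n)]
--     for p in range(2, n):
--         for m in range(2 * p, n, p):
--             sieve[m] = False
--     out = []
--     for i, c in enumerate(byte):
--         out.append(('0' if c == '1' else '1') if sieve[i] else c)
--     return "".join(out)
-- ===== Notes on version B (the rewrite author's own statement) =====
-- stated objective: faster
-- what changed: Replaces per-index trial-division primality testing with a Sieve of Eratosthenes boolean table built once over range(len(byte)), followed by a single enumerate pass that flips characters at prime indices.
import Mathlib
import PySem

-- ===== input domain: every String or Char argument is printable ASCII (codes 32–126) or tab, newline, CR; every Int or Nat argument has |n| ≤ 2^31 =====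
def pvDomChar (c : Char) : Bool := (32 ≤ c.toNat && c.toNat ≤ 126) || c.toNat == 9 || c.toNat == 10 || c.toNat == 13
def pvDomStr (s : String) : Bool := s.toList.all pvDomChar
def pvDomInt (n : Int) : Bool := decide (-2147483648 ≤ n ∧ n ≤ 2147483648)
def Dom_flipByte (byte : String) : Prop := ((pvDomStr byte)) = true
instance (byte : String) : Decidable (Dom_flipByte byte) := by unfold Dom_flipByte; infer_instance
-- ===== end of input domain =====

-- B replaces per-index trial-division primality tests with a Sieve of Eratosthenes
-- table plus one flipping pass (return value only; A's in-place list edit is internal).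

-- ===== PORT A =====
-- while i < n: if n % i == 0: return False else i += 1; return True
def isPrimeDiv (n i : Nat) : Bool :=
  if i < n then
    (if n % i == 0 then false else isPrimeDiv n (i + 1))
  else true
termination_by n - i

def isPrimeA (n : Nat) : Bool :=
  if n < 2 then false else isPrimeDiv n 2

-- for bit in byte: read byte[count], possibly overwrite byte[count], count += 1
def loopA : Nat → Nat → List Char → List Char
  | 0, _, bs => bs
  | k + 1, count, bs =>
    let bit := bs.getD count ' '
    let bs' :=
      if isPrimeA count then
        (if bit = '1' then bs.set count '0' else bs.set count '1')
      else bs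
    loopA k (count + 1) bs'

def flipByte (byte : String) : String :=
  String.mk (loopA byte.toList.length 0 byte.toList)

-- ===== PORT B =====
-- for m in range(2*p, n, p): sieve[m] = False   (fuel n bounds the step count)
def markMul : Nat → Nat → Nat → Nat → List Bool → List Bool
  | 0, _, _, _, sv => sv
  | f + 1, n, p, m, sv =>
    if m < n then markMul f n p (m + p) (sv.set m false) else sv

-- sieve = [i >= 2 for i in range(n)]; for p in range(2, n): mark multiples of p
def sieveB (n : Nat) : List Bool :=
  (List.range' 2 (n - 2)).foldl (fun sv p => markMul n n p (2 * p) sv)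
    ((List.range n).map (fun i => decide (2 ≤ i)))

def flipByte_alt (byte : String) : String :=
  let cs := byte.toList
  let sieve := sieveB cs.length
  String.mk (cs.mapIdx (fun i c =>
    if sieve.getD i false then (if c = '1' then '0' else '1') else c))

-- ===== PRECONDITION & SPEC =====
def Spec_flipByte (byte : String) (out : String) : Prop := out = flipByte_alt byte
instance (byte : String) (out : String) : Decidable (Spec_flipByte byte out) := by unfold Spec_flipByte; infer_instance

-- ===== CLAIM (what is proved, stated in full; the proofs are below) =====
def Claim_equal_flipByte : Prop := ∀ (byte : String), Dom_flipByte byte → Spec_flipByte byte (flipByte byte)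

-- ===== LEMMAS AND PROOFS =====

-- A's trial-division loop answers "no j in [i, n) divides n"
theorem isPrimeDiv_eq (n i : Nat) :
    isPrimeDiv n i = decide (∀ j, j < n → i ≤ j → ¬ j ∣ n) := by
  fun_induction isPrimeDiv n i with
  | case1 i h hmod =>
    simp only [beq_iff_eq] at hmod
    symm; simp only [decide_eq_false_iff_not]
    intro hall
    exact hall i h le_rfl (Nat.dvd_of_mod_eq_zero hmod)
  | case2 i h hmod ih =>
    simp only [beq_iff_eq] at hmod
    rw [ih]
    simp only [decide_eq_decide]
    constructor
    · intro H j hj hij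
      rcases Nat.eq_or_lt_of_le hij with rfl | h'
      · intro hd
        obtain ⟨c, rfl⟩ := hd
        exact hmod (Nat.mul_mod_right _ _)
      · exact H j hj h'
    · intro H j hj hij
      exact H j hj (Nat.le_of_succ_le hij)
  | case3 i h =>
    symm; simp only [decide_eq_true_eq]
    intro j hj hij
    omega

theorem isPrimeA_eq (n : Nat) :
    isPrimeA n = decide (2 ≤ n ∧ ∀ p, p < n → 2 ≤ p → ¬ p ∣ n) := by
  unfold isPrimeA
  split
  · rename_i h
    symm; simp only [decide_eq_false_iff_not]
    intro ⟨h2, _⟩; omega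
  · rename_i h
    rw [isPrimeDiv_eq]
    simp only [decide_eq_decide]
    constructor
    · intro H; exact ⟨by omega, fun p hp h2 => H p hp h2⟩
    · intro ⟨_, H⟩ j hj hij; exact H j hj hij

-- A's loop rewrites each remaining index by the prime test, keeping processed ones
theorem loopA_eq (k count : Nat) (bs : List Char) (h : bs.length = count + k) :
    loopA k count bs =
      bs.mapIdx (fun i c =>
        if count ≤ i ∧ isPrimeA i then (if c = '1' then '0' else '1') else c) := by
  induction k generalizing count bs with
  | zero =>
    simp only [loopA]
    apply List.ext_getElem (by simp)
    intro i hi _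
    simp only [List.getElem_mapIdx]
    have : ¬ (count ≤ i ∧ isPrimeA i = true) := by
      intro ⟨hc, _⟩; omega
    simp [this]
  | succ k ih =>
    simp only [loopA]
    have hcount : count < bs.length := by omega
    set bs' := if isPrimeA count then
        (if bs.getD count ' ' = '1' then bs.set count '0' else bs.set count '1')
      else bs with hbs'
    have hlen : bs'.length = bs.length := by
      rw [hbs']; split <;> [skip; rfl] <;> split <;> simp
    rw [ih (count + 1) bs' (by omega)]
    apply List.ext_getElem (by simp [hlen])
    intro i hi hi2
    simp only [List.length_mapIdx] at hi hi2
    simp only [List.getElem_mapIdx]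
    have hget : bs.getD count ' ' = bs[count] := List.getD_eq_getElem bs ' ' hcount
    by_cases hic : i = count
    · subst hic
      have h1 : ¬ (i + 1 ≤ i ∧ isPrimeA i = true) := by intro ⟨hc, _⟩; omega
      simp only [h1, if_false]
      by_cases hp : isPrimeA i
      · simp only [hbs', hp, if_true, hget]
        by_cases hb : bs[i] = '1' <;>
          simp [hb, List.getElem_set_self, And.intro (le_refl i)]
      · simp [hbs', hp]
    · have hne : count ≠ i := fun e => hic e.symm
      have hbv : bs'[i]'hi = bs[i]'hi2 := by
        simp only [hbs']
        split <;> [skip; rfl] <;> split <;> simp [List.getElem_set_ne hne]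
      simp only [hbv]
      by_cases hle : count ≤ i
      · have : count + 1 ≤ i := by omega
        simp [this, hle]
      · have h1 : ¬ (count + 1 ≤ i) := by omega
        simp [h1, hle]

theorem markMul_length (f n p m : Nat) (sv : List Bool) :
    (markMul f n p m sv).length = sv.length := by
  induction f generalizing m sv with
  | zero => rfl
  | succ f ih =>
    simp only [markMul]
    split
    · rw [ih]; simp
    · rfl

-- the inner loop clears exactly the slots m, m+p, m+2p, … below n
theorem markMul_getD (f n p m : Nat) (sv : List Bool) (hsv : sv.length = n)
    (hp : 1 ≤ p) (hf : n ≤ m + f * p) (i : Nat) (hi : i < n) :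
    (markMul f n p m sv).getD i false =
      (sv.getD i false && !(decide (m ≤ i ∧ p ∣ (i - m)))) := by
  induction f generalizing m sv with
  | zero =>
    simp only [markMul]
    have : ¬ (m ≤ i ∧ p ∣ (i - m)) := by intro ⟨h1, _⟩; omega
    simp [this]
  | succ f ih =>
    simp only [markMul]
    split
    · rename_i hm
      rw [Nat.succ_mul] at hf
      rw [ih (m + p) (sv.set m false) (by simp [hsv]) (by omega)]
      by_cases him : i = m
      · subst him
        have hlen : i < (sv.set i false).length := by simp [hsv]; omega
        have hset : (sv.set i false).getD i false = false := by
          rw [List.getD_eq_getElem _ _ hlen]; simp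
        have htrue : decide (i ≤ i ∧ p ∣ (i - i)) = true := by simp
        simp only [List.getD] at hset
        simp [hset, htrue]
      · have hset : (sv.set m false).getD i false = sv.getD i false := by
          rw [List.getD_eq_getElem _ _ (by simp; omega), List.getD_eq_getElem _ _ (by omega)]
          exact List.getElem_set_ne (fun e => him e.symm) ..
        rw [hset]
        have : (m + p ≤ i ∧ p ∣ (i - (m + p))) ↔ (m ≤ i ∧ p ∣ (i - m)) := by
          constructor
          · intro ⟨h1, h2⟩
            refine ⟨by omega, ?_⟩
            have : i - m = (i - (m + p)) + p := by omega
            rw [this]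
            exact Nat.dvd_add h2 dvd_rfl
          · intro ⟨h1, h2⟩
            have hmi : m < i := by omega
            have hple : p ≤ i - m := Nat.le_of_dvd (by omega) h2
            refine ⟨by omega, ?_⟩
            have : i - (m + p) = (i - m) - p := by omega
            rw [this]
            exact Nat.dvd_sub h2 dvd_rfl
        rw [show (decide (m + p ≤ i ∧ p ∣ (i - (m + p)))) = decide (m ≤ i ∧ p ∣ (i - m)) from by
          simp only [decide_eq_decide]; exact this]
    · rename_i hm
      have : ¬ (m ≤ i ∧ p ∣ (i - m)) := by intro ⟨h1, _⟩; omega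
      simp [this]

-- folding the inner loop over a list of p's clears the union of their multiples
theorem fold_getD (L : List Nat) (n : Nat) (sv : List Bool) (hsv : sv.length = n)
    (hL : ∀ p ∈ L, 1 ≤ p) (i : Nat) (hi : i < n) :
    (L.foldl (fun sv p => markMul n n p (2 * p) sv) sv).getD i false =
      (sv.getD i false && !(decide (∃ p ∈ L, 2 * p ≤ i ∧ p ∣ (i - 2 * p)))) := by
  induction L generalizing sv with
  | nil => simp
  | cons q L ih =>
    simp only [List.foldl_cons]
    have hq : 1 ≤ q := hL q (by simp)
    have hfuel : n ≤ 2 * q + n * q := by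
      have := Nat.mul_le_mul_left n hq
      omega
    rw [ih _ (by rw [markMul_length, hsv]) (fun p hp => hL p (by simp [hp]))]
    rw [markMul_getD n n q (2 * q) sv hsv hq hfuel i hi]
    by_cases h1 : (2 * q ≤ i ∧ q ∣ i - 2 * q) <;>
      simp [h1, Bool.and_assoc]

-- the sieve table agrees with trial division on every index below n
theorem sieveB_getD (n i : Nat) (hi : i < n) :
    (sieveB n).getD i false =
      decide (2 ≤ i ∧ ∀ p, p < i → 2 ≤ p → ¬ p ∣ i) := by
  unfold sieveB
  rw [fold_getD _ n _ (by simp)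
    (fun p hp => by simp [List.mem_range'_1] at hp; omega) i hi]
  have hsv0 : ((List.range n).map (fun j => decide (2 ≤ j))).getD i false = decide (2 ≤ i) := by
    rw [List.getD_eq_getElem _ _ (by simp [hi])]; simp
  rw [hsv0, ← decide_not, ← Bool.decide_and, decide_eq_decide]
  constructor
  · intro ⟨h2, hnex⟩
    refine ⟨h2, fun p hpi hp2 hdvd => ?_⟩
    obtain ⟨c, rfl⟩ := hdvd
    have hc2 : 2 ≤ c := by
      rcases Nat.lt_or_ge c 2 with h | h
      · interval_cases c <;> omega
      · exact h
    have hle : 2 * p ≤ p * c := by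
      have := Nat.mul_le_mul_left p hc2
      omega
    refine hnex ⟨p, ?_, hle, ⟨c - 2, ?_⟩⟩
    · simp only [List.mem_range'_1]
      omega
    · rw [Nat.mul_sub]; omega
  · intro ⟨h2, hall⟩
    refine ⟨h2, fun ⟨p, hmem, hle, hdvd⟩ => ?_⟩
    simp only [List.mem_range'_1] at hmem
    have hpi : p < i := by omega
    have : p ∣ i := by
      have h2p : p ∣ 2 * p := dvd_mul_left p 2
      have : i = (i - 2 * p) + 2 * p := by omega
      rw [this]
      exact Nat.dvd_add hdvd h2p
    exact hall p hpi (by omega) this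

-- ===== VERDICT (by name: the statement is the Claim_ definition above) =====
theorem flipByte_spec : Claim_equal_flipByte := by
  intro byte _
  unfold Spec_flipByte flipByte flipByte_alt
  rw [loopA_eq byte.toList.length 0 byte.toList (by omega)]
  congr 1
  apply List.ext_getElem (by simp)
  intro i hi hi2
  simp only [List.length_mapIdx] at hi hi2
  simp only [List.getElem_mapIdx]
  rw [isPrimeA_eq, sieveB_getD byte.toList.length i hi]
  simp
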